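-- pv_equiv track=rewrite | github.com/mekartje/mmdom_SALS | scripts/vcf_pi.py | sum_pair_diff
-- ===== SOURCE A (Python) =====
-- def site_pair_diff(snp_lis, exclude_tx_miss = True):
--     diff_count = 0
--     num_pairwise_comparisons = 0
--     for i in range(len(snp_lis)):
--         #exclude sites above missing data threshold or transcribed sites. Also exclude individuals with missing data
--         if exclude_tx_miss is True and snp_lis[i] == 'X' or snp_lis[i] == 'M' or snp_lis[i] == '.':
--             continue
--         else:
--             #to avoid double-counting pairs, only use item in list greater than first
--             for j in range(i + 1, len(snp_lis)):
--                 #exclude sites above missing data threshold or transcribed sites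
--                 if exclude_tx_miss is True and snp_lis[j] != 'X' and snp_lis[i] != 'M' and snp_lis[i] != '.':
--                     num_pairwise_comparisons += 1
--                     if snp_lis[i] != snp_lis[j]:
--                         diff_count += 1
--     return((diff_count, num_pairwise_comparisons))
--
-- def sum_pair_diff(haplo_lis, exclude_tx_miss = True):
--     diff_counts = []
--     for i in range(len(haplo_lis[0])):
--         snp_lis = []
--         for j in haplo_lis:
--             snp_lis.append(j[i])
--         diff_counts.append(site_pair_diff(snp_lis = snp_lis, exclude_tx_miss = exclude_tx_miss))
--     return(diff_counts)
-- ===== SOURCE B (Python) =====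
-- def sum_pair_diff(haplo_lis, exclude_tx_miss = True):
--     # One left-to-... right-to-left pass per column with a running char tally of the
--     # non-'X' characters seen so far (= positions j > i), instead of A's nested pair scan.
--     # Note: A's inner guard requires exclude_tx_miss to be True, so with
--     # exclude_tx_miss False nothing is ever counted; B reproduces that.
--     n_cols = len(haplo_lis[0])
--     res = []
--     for i in range(n_cols):
--         col = [h[i] for h in haplo_lis]
--         diff = 0
--         comps = 0
--         tally = {}   # counts of chars at later positions whose char is not 'X'
--         total = 0    # sum of tally values
--         for c in reversed(col):
--             if exclude_tx_miss and c not in ('X', 'M', '.'):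
--                 diff += total - tally.get(c, 0)
--                 comps += total
--             if c != 'X':
--                 tally[c] = tally.get(c, 0) + 1
--                 total += 1
--         res.append((diff, comps))
--     return res
-- ===== Notes on version B (the rewrite author's own statement) =====
-- stated objective: faster
-- what changed: Replaces A's nested per-column pairwise scan (for each eligible position, rescan all later positions) by a single right-to-left pass per column that keeps a running dict tally of the non-'X' characters seen so far, so each position's diff/comparison contribution is computed in O(1).
-- outside the precondition, e.g. on sum_pair_diff([], True): A raises IndexError, B raises IndexError; on sum_pair_diff(['AB', 'A'], True): A raises IndexError, B raises IndexError
import Mathlib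
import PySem

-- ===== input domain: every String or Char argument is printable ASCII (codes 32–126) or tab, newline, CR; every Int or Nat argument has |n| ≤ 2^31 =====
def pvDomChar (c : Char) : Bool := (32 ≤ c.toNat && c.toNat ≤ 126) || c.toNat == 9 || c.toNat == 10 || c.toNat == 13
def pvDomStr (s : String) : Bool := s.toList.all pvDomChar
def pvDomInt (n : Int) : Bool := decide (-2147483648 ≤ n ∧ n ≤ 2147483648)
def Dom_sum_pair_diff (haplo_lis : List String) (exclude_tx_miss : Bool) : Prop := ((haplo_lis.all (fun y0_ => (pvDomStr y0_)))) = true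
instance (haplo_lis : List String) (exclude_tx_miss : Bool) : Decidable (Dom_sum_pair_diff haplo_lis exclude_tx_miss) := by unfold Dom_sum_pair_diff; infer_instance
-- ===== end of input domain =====

-- B replaces A's nested per-column pairwise scan by a single right-to-left pass per
-- column with a running tally of the non-'X' characters seen so far (objective: faster).

-- ===== PORT A =====
-- inner j-loop of site_pair_diff (j ranges over the elements after position i; c = snp_lis[i])
def innerA (excl : Bool) (c : Char) (rest : List Char) (st : Int × Int) : Int × Int :=
  rest.foldl (fun st2 d =>
    if excl = true ∧ d ≠ 'X' ∧ c ≠ 'M' ∧ c ≠ '.' then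
      (st2.1 + (if c ≠ d then 1 else 0), st2.2 + 1)
    else st2) st

-- outer i-loop of site_pair_diff: each position with its strict suffix
def siteA (excl : Bool) : List Char → Int × Int → Int × Int
  | [], st => st
  | c :: rest, st =>
      siteA excl rest (if (excl = true ∧ c = 'X') ∨ c = 'M' ∨ c = '.' then st else innerA excl c rest st)

def sum_pair_diff (haplo_lis : List String) (exclude_tx_miss : Bool) : List (Int × Int) :=
  (List.range (haplo_lis.headD "").toList.length).map (fun i =>
    siteA exclude_tx_miss (haplo_lis.map (fun h => h.toList.getD i ' ')) (0, 0))

-- ===== PORT B =====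
-- one step of B's reversed pass: state = (diff, comps, tally, total)
def stepB (excl : Bool) (st : Int × Int × PySem.Dict Char Int × Int) (c : Char) :
    Int × Int × PySem.Dict Char Int × Int :=
  let dc : Int × Int :=
    if excl = true ∧ c ≠ 'X' ∧ c ≠ 'M' ∧ c ≠ '.' then
      (st.1 + (st.2.2.2 - st.2.2.1.getD c 0), st.2.1 + st.2.2.2)
    else (st.1, st.2.1)
  if c ≠ 'X' then (dc.1, dc.2, st.2.2.1.insert c (st.2.2.1.getD c 0 + 1), st.2.2.2 + 1)
  else (dc.1, dc.2, st.2.2.1, st.2.2.2)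

def colStats (excl : Bool) (col : List Char) : Int × Int :=
  let r := col.reverse.foldl (stepB excl) (0, 0, PySem.Dict.empty, 0)
  (r.1, r.2.1)

def sum_pair_diff_alt (haplo_lis : List String) (exclude_tx_miss : Bool) : List (Int × Int) :=
  (List.range (haplo_lis.headD "").toList.length).map (fun i =>
    colStats exclude_tx_miss (haplo_lis.map (fun h => h.toList.getD i ' ')))

-- ===== PRECONDITION & SPEC =====
-- Pre_ excludes exactly the inputs where Python A raises IndexError: the empty list
-- (haplo_lis[0]) and lists containing a string shorter than the first one (j[i]).
def Pre_sum_pair_diff (haplo_lis : List String) (exclude_tx_miss : Bool) : Prop :=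
  haplo_lis ≠ [] ∧ ∀ s ∈ haplo_lis, (haplo_lis.headD "").toList.length ≤ s.toList.length
instance (haplo_lis : List String) (exclude_tx_miss : Bool) : Decidable (Pre_sum_pair_diff haplo_lis exclude_tx_miss) := by unfold Pre_sum_pair_diff; infer_instance

def pvWitness_sum_pair_diff : List String × Bool := (["ACM", "AG.", "XCA"], true)

def Spec_sum_pair_diff (haplo_lis : List String) (exclude_tx_miss : Bool) (out : List (Int × Int)) : Prop := out = sum_pair_diff_alt haplo_lis exclude_tx_miss
instance (haplo_lis : List String) (exclude_tx_miss : Bool) (out : List (Int × Int)) : Decidable (Spec_sum_pair_diff haplo_lis exclude_tx_miss out) := by unfold Spec_sum_pair_diff; infer_instance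

-- ===== CLAIM (what is proved, stated in full; the proofs are below) =====
def Claim_equal_sum_pair_diff : Prop := ∀ (haplo_lis : List String) (exclude_tx_miss : Bool), Dom_sum_pair_diff haplo_lis exclude_tx_miss → Pre_sum_pair_diff haplo_lis exclude_tx_miss → Spec_sum_pair_diff haplo_lis exclude_tx_miss (sum_pair_diff haplo_lis exclude_tx_miss)

-- ===== LEMMAS AND PROOFS =====

-- closed-form contribution of one eligible position: diff over later non-'X' unequal chars …
def specD : List Char → Int
  | [] => 0
  | c :: rest =>
      (if c ≠ 'X' ∧ c ≠ 'M' ∧ c ≠ '.' then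
        ((rest.filter (fun d => d != 'X' && c != d)).length : Int) else 0) + specD rest

-- … and comparisons over later non-'X' chars
def specC : List Char → Int
  | [] => 0
  | c :: rest =>
      (if c ≠ 'X' ∧ c ≠ 'M' ∧ c ≠ '.' then
        ((rest.filter (fun d => d != 'X')).length : Int) else 0) + specC rest

theorem innerA_false (c : Char) (rest : List Char) (st : Int × Int) :
    innerA false c rest st = st := by
  induction rest generalizing st with
  | nil => rfl
  | cons d rest ih =>
      simp only [innerA, List.foldl_cons] at ih ⊢
      rw [if_neg (by simp)]
      exact ih st

theorem siteA_false (l : List Char) (st : Int × Int) : siteA false l st = st := by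
  induction l generalizing st with
  | nil => rfl
  | cons c rest ih =>
      simp only [siteA]
      split
      · exact ih st
      · rw [innerA_false]; exact ih st

theorem innerA_true (c : Char) (rest : List Char) (st : Int × Int)
    (hM : c ≠ 'M') (hP : c ≠ '.') :
    innerA true c rest st =
      (st.1 + ((rest.filter (fun d => d != 'X' && c != d)).length : Int),
       st.2 + ((rest.filter (fun d => d != 'X')).length : Int)) := by
  induction rest generalizing st with
  | nil => simp [innerA]
  | cons d rest ih =>
      simp only [innerA, List.foldl_cons] at ih ⊢
      rw [ih]
      by_cases hd : d = 'X'
      · subst hd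
        rw [if_neg (by simp)]
        simp
      · rw [if_pos (⟨by trivial, hd, hM, hP⟩ : _ ∧ _)]
        by_cases hcd : c = d
        · subst hcd
          simp [hd, Prod.ext_iff]
          ring
        · simp [hd, hcd, Prod.ext_iff]
          constructor <;> ring

theorem siteA_true (l : List Char) (st : Int × Int) :
    siteA true l st = (st.1 + specD l, st.2 + specC l) := by
  induction l generalizing st with
  | nil => simp [siteA, specD, specC]
  | cons c rest ih =>
      simp only [siteA]
      by_cases he : c ≠ 'X' ∧ c ≠ 'M' ∧ c ≠ '.'
      · rw [if_neg (by tauto), innerA_true c rest st he.2.1 he.2.2, ih]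
        simp only [specD, specC, if_pos he, Prod.mk.injEq]
        constructor <;> ring
      · rw [if_pos (by tauto)]
        rw [ih]
        simp only [specD, specC, if_neg he, Prod.mk.injEq]
        constructor <;> ring

def foldB (excl : Bool) (l : List Char) : Int × Int × PySem.Dict Char Int × Int :=
  l.foldr (fun c st => stepB excl st c) (0, 0, PySem.Dict.empty, 0)

theorem foldB_total (excl : Bool) (l : List Char) :
    (foldB excl l).2.2.2 = ((l.filter (fun d => d != 'X')).length : Int) := by
  induction l with
  | nil => rfl
  | cons c rest ih =>
      rw [show foldB excl (c :: rest) = stepB excl (foldB excl rest) c from rfl]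
      simp only [stepB]
      by_cases hc : c = 'X'
      · rw [if_neg (by simp [hc])]
        simp [hc, ih]
      · rw [if_pos hc]
        simp [hc, ih]

theorem foldB_tally (excl : Bool) (l : List Char) (ch : Char) (h : ch ≠ 'X') :
    (foldB excl l).2.2.1.getD ch 0 = (l.count ch : Int) := by
  induction l with
  | nil => simp [foldB, PySem.Dict.getD_empty]
  | cons c rest ih =>
      rw [show foldB excl (c :: rest) = stepB excl (foldB excl rest) c from rfl]
      simp only [stepB]
      by_cases hc : c = 'X'
      · rw [if_neg (by simp [hc])]
        have : ¬(c == ch) = true := by simp [hc, Ne.symm h]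
        simp [List.count_cons, this, ih]
      · rw [if_pos hc]
        by_cases hcc : ch = c
        · subst hcc
          simp [PySem.Dict.getD_insert, ih]
        · simp [PySem.Dict.getD_insert, hcc, Ne.symm hcc, ih]

theorem filter_split (l : List Char) (c : Char) (hc : c ≠ 'X') :
    (l.filter (fun d => d != 'X')).length
      = (l.filter (fun d => d != 'X' && c != d)).length + l.count c := by
  induction l with
  | nil => simp
  | cons d rest ih =>
      by_cases hd : d = 'X'
      · subst hd
        simp [Ne.symm hc, ih]
      · by_cases hcd : c = d
        · subst hcd
          simp [hd, ih]; omega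
        · simp [hd, bne_iff_ne, hcd, Ne.symm hcd, ih]; omega

theorem foldB_true (l : List Char) :
    (foldB true l).1 = specD l ∧ (foldB true l).2.1 = specC l := by
  induction l with
  | nil => exact ⟨rfl, rfl⟩
  | cons c rest ih =>
      rw [show foldB true (c :: rest) = stepB true (foldB true rest) c from rfl]
      have ht := foldB_total true rest
      simp only [stepB]
      by_cases he : c ≠ 'X' ∧ c ≠ 'M' ∧ c ≠ '.'
      · have hta := foldB_tally true rest c he.1
        have hsp : ((rest.filter (fun d => d != 'X')).length : Int)
            = ((rest.filter (fun d => d != 'X' && c != d)).length : Int) + (rest.count c : Int) := by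
          exact_mod_cast filter_split rest c he.1
        rw [if_pos (⟨trivial, he⟩ : True ∧ _), if_pos he.1]
        constructor
        · simp only [specD, if_pos he]
          rw [ih.1, ht, hta]
          omega
        · simp only [specC, if_pos he]
          rw [ih.2, ht]
          ring
      · rw [if_neg (fun (hh : True ∧ _) => he hh.2)]
        constructor
        · split_ifs <;> simp [specD, if_neg he, ih.1]
        · split_ifs <;> simp [specC, if_neg he, ih.2]

theorem colStats_foldB (excl : Bool) (col : List Char) :
    colStats excl col = ((foldB excl col).1, (foldB excl col).2.1) := by
  simp [colStats, foldB, List.foldl_reverse]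

theorem foldB_false (l : List Char) :
    (foldB false l).1 = 0 ∧ (foldB false l).2.1 = 0 := by
  induction l with
  | nil => exact ⟨rfl, rfl⟩
  | cons c rest ih =>
      rw [show foldB false (c :: rest) = stepB false (foldB false rest) c from rfl]
      simp only [stepB]
      rw [if_neg (by simp : ¬(false = true ∧ c ≠ 'X' ∧ c ≠ 'M' ∧ c ≠ '.'))]
      constructor <;> split_ifs <;> simp [ih.1, ih.2]

theorem site_eq_colStats (excl : Bool) (col : List Char) :
    siteA excl col (0, 0) = colStats excl col := by
  cases excl with
  | false =>
      rw [siteA_false, colStats_foldB]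
      have := foldB_false col
      simp [this.1, this.2]
  | true =>
      rw [siteA_true, colStats_foldB]
      have := foldB_true col
      simp [this.1, this.2]

-- ===== VERDICT (by name: the statement is the Claim_ definition above) =====
theorem sum_pair_diff_spec : Claim_equal_sum_pair_diff := by
  intro haplo_lis exclude_tx_miss _ _
  unfold Spec_sum_pair_diff sum_pair_diff sum_pair_diff_alt
  exact List.map_congr_left (fun i _ => site_eq_colStats exclude_tx_miss _)
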